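-- pv_equiv track=rewrite | github.com/gustavomotadev/mata52-packing | packing.py | quantidade_blocos
-- ===== SOURCE A (Python) =====
-- from enum import IntEnum
--
-- class TipoBloco(IntEnum):
--     VAZIO = 0           #fora da area designada
--     DISPONIVEL = 1      #disponivel para ser preenchido
--     PREENCHIDO = 2      #ja preenchido
--     BURACO = 3          #buraco que nao foi possivel de ser preenchido
--     IMPOSSIVEL = 4      #buraco que não poderia ser preenchido de nenhuma maneira
--
-- def borda(matriz, largura, altura, x, y):
--
--     if (matriz[y][x] != TipoBloco.VAZIO and
--         (x == 0 or y == 0 or x == largura-1 or y == altura-1 or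
--         matriz[y][x-1] == TipoBloco.VAZIO or
--         matriz[y][x+1] == TipoBloco.VAZIO or
--         matriz[y-1][x] == TipoBloco.VAZIO or
--         matriz[y+1][x] == TipoBloco.VAZIO)):
--
--         return True
--
--     return False
--
-- def quantidade_blocos(matriz, largura, altura):
--     soma = [0 for _ in range(len(TipoBloco) + 4)]
--
--     for y in range(altura):
--         for x in range(largura):
--             soma[matriz[y][x]] += 1
--
--             if not matriz[y][x] == TipoBloco.VAZIO:
--                 if not borda(matriz, largura, altura, x, y):
--                     soma[6] += 1
--                     if matriz[y][x] == TipoBloco.PREENCHIDO: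
--                         soma[5] += 1
--                 else:
--                     soma[8] += 1
--                     if matriz[y][x] == TipoBloco.PREENCHIDO:
--                         soma[7] += 1
--
--
--     return soma
-- ===== SOURCE B (Python) =====
-- def quantidade_blocos(matriz, largura, altura):
--     # Pass 1: collect the set of border cells. A cell is border if it is
--     # non-empty and lies on the outer edge, or is orthogonally adjacent
--     # to an in-grid empty (VAZIO) cell.
--     border = set()
--     for y in range(altura):
--         for x in range(largura):
--             if matriz[y][x] == 0:
--                 for nx, ny in ((x - 1, y), (x + 1, y), (x, y - 1), (x, y + 1)):
--                     if 0 <= nx < largura and 0 <= ny < altura and matriz[ny][nx] != 0: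
--                         border.add((nx, ny))
--             elif x == 0 or y == 0 or x == largura - 1 or y == altura - 1:
--                 border.add((x, y))
--     # Pass 2: one sweep counting every cell, classifying non-empty cells
--     # by membership in the border set.
--     soma = [0] * 9
--     for y in range(altura):
--         for x in range(largura):
--             v = matriz[y][x]
--             soma[v] += 1
--             if v != 0:
--                 if (x, y) in border:
--                     soma[8] += 1
--                     if v == 2:
--                         soma[7] += 1
--                 else:
--                     soma[6] += 1
--                     if v == 2:
--                         soma[5] += 1
--     return soma
-- ===== Notes on version B (the rewrite author's own statement) =====
-- stated objective: alternative
-- what changed: Instead of each filled cell probing its four neighbors via borda(), B first builds a border set in one sweep (empty cells mark their non-empty in-grid neighbors, edge non-empty cells mark themselves) and then counts in a second sweep using set membership.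
import Mathlib
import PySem

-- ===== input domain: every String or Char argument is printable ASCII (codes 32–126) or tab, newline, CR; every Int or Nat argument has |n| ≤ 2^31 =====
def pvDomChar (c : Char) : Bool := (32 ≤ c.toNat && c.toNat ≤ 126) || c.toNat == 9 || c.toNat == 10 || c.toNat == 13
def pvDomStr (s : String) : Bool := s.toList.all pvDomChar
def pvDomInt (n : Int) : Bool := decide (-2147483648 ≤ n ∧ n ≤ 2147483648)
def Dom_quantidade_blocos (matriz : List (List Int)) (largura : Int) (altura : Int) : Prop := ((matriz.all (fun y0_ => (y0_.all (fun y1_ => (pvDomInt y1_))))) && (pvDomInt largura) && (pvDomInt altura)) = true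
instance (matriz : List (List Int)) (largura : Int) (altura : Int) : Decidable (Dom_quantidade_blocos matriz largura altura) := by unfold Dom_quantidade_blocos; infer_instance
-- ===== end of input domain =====

-- B replaces A's per-cell neighbor probing (borda) by a first sweep that builds the
-- set of border cells and a second counting sweep using set membership (objective:
-- alternative decomposition, same asymptotic cost).

-- matriz[y][x], totalized (Pre_ guarantees every performed access is in range)
def pvCell (matriz : List (List Int)) (y x : Int) : Int :=
  PySem.List.pyGetD (PySem.List.pyGetD matriz y []) x 0

-- soma[i] += 1, totalized (Pre_ guarantees -9 ≤ cell ≤ 8, so the index is in range)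
def pvInc (soma : List Int) (i : Int) : List Int :=
  PySem.List.pySetD soma i (PySem.List.pyGetD soma i 0 + 1)

-- ===== PORT A =====
def borda (matriz : List (List Int)) (largura altura x y : Int) : Bool :=
  decide (pvCell matriz y x ≠ 0) &&
    (decide (x = 0) || decide (y = 0) || decide (x = largura - 1) || decide (y = altura - 1) ||
     decide (pvCell matriz y (x - 1) = 0) || decide (pvCell matriz y (x + 1) = 0) ||
     decide (pvCell matriz (y - 1) x = 0) || decide (pvCell matriz (y + 1) x = 0))

def quantidade_blocos (matriz : List (List Int)) (largura : Int) (altura : Int) : List Int :=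
  (PySem.List.pyRange 0 altura 1).foldl (fun soma y =>
    (PySem.List.pyRange 0 largura 1).foldl (fun soma x =>
      let soma := pvInc soma (pvCell matriz y x)
      if pvCell matriz y x ≠ 0 then
        if !(borda matriz largura altura x y) then
          let soma := pvInc soma 6
          if pvCell matriz y x = 2 then pvInc soma 5 else soma
        else
          let soma := pvInc soma 8
          if pvCell matriz y x = 2 then pvInc soma 7 else soma
      else soma) soma) (List.replicate 9 (0 : Int))

-- ===== PORT B =====
-- border.add((nx, ny)) guarded by the in-grid/non-empty test
def pvMark (matriz : List (List Int)) (largura altura : Int)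
    (b : PySem.Set (Int × Int)) (p : Int × Int) : PySem.Set (Int × Int) :=
  if 0 ≤ p.1 ∧ p.1 < largura ∧ 0 ≤ p.2 ∧ p.2 < altura ∧ pvCell matriz p.2 p.1 ≠ 0 then
    PySem.Set.add b p
  else b

-- pass 1 of B: build the set of border cells
def pvBorderSet (matriz : List (List Int)) (largura altura : Int) : PySem.Set (Int × Int) :=
  (PySem.List.pyRange 0 altura 1).foldl (fun b y =>
    (PySem.List.pyRange 0 largura 1).foldl (fun b x =>
      if pvCell matriz y x = 0 then
        [(x - 1, y), (x + 1, y), (x, y - 1), (x, y + 1)].foldl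
          (pvMark matriz largura altura) b
      else if x = 0 ∨ y = 0 ∨ x = largura - 1 ∨ y = altura - 1 then
        PySem.Set.add b (x, y)
      else b) b) PySem.Set.empty

def quantidade_blocos_alt (matriz : List (List Int)) (largura : Int) (altura : Int) : List Int :=
  let border := pvBorderSet matriz largura altura
  (PySem.List.pyRange 0 altura 1).foldl (fun soma y =>
    (PySem.List.pyRange 0 largura 1).foldl (fun soma x =>
      let v := pvCell matriz y x
      let soma := pvInc soma v
      if v ≠ 0 then
        if PySem.Set.contains border (x, y) then
          let soma := pvInc soma 8
          if v = 2 then pvInc soma 7 else soma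
        else
          let soma := pvInc soma 6
          if v = 2 then pvInc soma 5 else soma
      else soma) soma) (List.replicate 9 (0 : Int))

-- ===== PRECONDITION & SPEC =====
-- Exactly where Python A returns: the first altura rows exist, each is at least
-- largura wide, and every scanned cell value is a valid index into the 9-slot
-- counter list (Python wraps -9..-1; values outside -9..8 raise IndexError).
def Pre_quantidade_blocos (matriz : List (List Int)) (largura : Int) (altura : Int) : Prop :=
  0 < largura →
  altura.toNat ≤ matriz.length ∧
  ∀ row ∈ matriz.take altura.toNat, largura.toNat ≤ row.length ∧
    ∀ v ∈ row.take largura.toNat, -9 ≤ v ∧ v ≤ 8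

instance (matriz : List (List Int)) (largura : Int) (altura : Int) : Decidable (Pre_quantidade_blocos matriz largura altura) := by unfold Pre_quantidade_blocos; infer_instance

def pvWitness_quantidade_blocos : List (List Int) × Int × Int := ([[0, 1], [2, 2]], 2, 2)

def Spec_quantidade_blocos (matriz : List (List Int)) (largura : Int) (altura : Int) (out : List Int) : Prop := out = quantidade_blocos_alt matriz largura altura
instance (matriz : List (List Int)) (largura : Int) (altura : Int) (out : List Int) : Decidable (Spec_quantidade_blocos matriz largura altura out) := by unfold Spec_quantidade_blocos; infer_instance

-- ===== CLAIM (what is proved, stated in full; the proofs are below) =====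
def Claim_equal_quantidade_blocos : Prop := ∀ (matriz : List (List Int)) (largura : Int) (altura : Int), Dom_quantidade_blocos matriz largura altura → Pre_quantidade_blocos matriz largura altura → Spec_quantidade_blocos matriz largura altura (quantidade_blocos matriz largura altura)

-- ===== LEMMAS AND PROOFS =====

-- contribution of the scan of cell (x, y) in B's first pass
def pvContrib (matriz : List (List Int)) (largura altura x y : Int) (p : Int × Int) : Prop :=
  if pvCell matriz y x = 0 then
    (p = (x - 1, y) ∨ p = (x + 1, y) ∨ p = (x, y - 1) ∨ p = (x, y + 1)) ∧
      0 ≤ p.1 ∧ p.1 < largura ∧ 0 ≤ p.2 ∧ p.2 < altura ∧ pvCell matriz p.2 p.1 ≠ 0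
  else (x = 0 ∨ y = 0 ∨ x = largura - 1 ∨ y = altura - 1) ∧ p = (x, y)

-- A's borda test, read as a proposition
lemma pv_borda_iff (matriz : List (List Int)) (largura altura x y : Int) :
    borda matriz largura altura x y = true ↔
      pvCell matriz y x ≠ 0 ∧ (x = 0 ∨ y = 0 ∨ x = largura - 1 ∨ y = altura - 1 ∨
        pvCell matriz y (x - 1) = 0 ∨ pvCell matriz y (x + 1) = 0 ∨
        pvCell matriz (y - 1) x = 0 ∨ pvCell matriz (y + 1) x = 0) := by
  unfold borda
  simp [or_assoc]

-- membership through a fold of conditional adds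
lemma pv_mem_foldl {α β : Type} [BEq β] [LawfulBEq β] (C : α → β → Prop) (p : β)
    (g : PySem.Set β → α → PySem.Set β)
    (hg : ∀ s a, p ∈ g s a ↔ p ∈ s ∨ C a p) :
    ∀ (l : List α) (s : PySem.Set β), p ∈ l.foldl g s ↔ p ∈ s ∨ ∃ a ∈ l, C a p := by
  intro l
  induction l with
  | nil => simp
  | cons a l ih =>
      intro s
      rw [List.foldl_cons, ih]
      simp only [List.mem_cons, hg]
      constructor
      · rintro ((h | h) | ⟨b, hb, hc⟩)
        · exact Or.inl h
        · exact Or.inr ⟨a, Or.inl rfl, h⟩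
        · exact Or.inr ⟨b, Or.inr hb, hc⟩
      · rintro (h | ⟨b, (rfl | hb), hc⟩)
        · exact Or.inl (Or.inl h)
        · exact Or.inl (Or.inr hc)
        · exact Or.inr ⟨b, hb, hc⟩

lemma pv_mem_mark (matriz : List (List Int)) (largura altura : Int)
    (b : PySem.Set (Int × Int)) (q p : Int × Int) :
    p ∈ pvMark matriz largura altura b q ↔
      p ∈ b ∨ (p = q ∧ 0 ≤ p.1 ∧ p.1 < largura ∧ 0 ≤ p.2 ∧ p.2 < altura ∧
        pvCell matriz p.2 p.1 ≠ 0) := by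
  unfold pvMark
  split_ifs with h
  · rw [PySem.Set.mem_add]
    constructor
    · rintro (hb | rfl)
      · exact Or.inl hb
      · exact Or.inr ⟨rfl, h⟩
    · rintro (hb | ⟨rfl, _⟩)
      · exact Or.inl hb
      · exact Or.inr rfl
  · constructor
    · exact Or.inl
    · rintro (hb | ⟨rfl, h2⟩)
      · exact hb
      · exact absurd h2 h

-- per-cell step of B's first pass
lemma pv_mem_step (matriz : List (List Int)) (largura altura x y : Int)
    (b : PySem.Set (Int × Int)) (p : Int × Int) :
    p ∈ (if pvCell matriz y x = 0 then
          [(x - 1, y), (x + 1, y), (x, y - 1), (x, y + 1)].foldl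
            (pvMark matriz largura altura) b
        else if x = 0 ∨ y = 0 ∨ x = largura - 1 ∨ y = altura - 1 then
          PySem.Set.add b (x, y)
        else b) ↔ p ∈ b ∨ pvContrib matriz largura altura x y p := by
  unfold pvContrib
  split_ifs with h0 hedge
  · simp only [List.foldl_cons, List.foldl_nil, pv_mem_mark]
    tauto
  · rw [PySem.Set.mem_add]
    tauto
  · tauto

-- characterization of the border set
lemma pv_mem_borderSet (matriz : List (List Int)) (largura altura : Int) (p : Int × Int) :
    p ∈ pvBorderSet matriz largura altura ↔
      ∃ y ∈ PySem.List.pyRange 0 altura 1, ∃ x ∈ PySem.List.pyRange 0 largura 1,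
        pvContrib matriz largura altura x y p := by
  unfold pvBorderSet
  rw [pv_mem_foldl (fun y p => ∃ x ∈ PySem.List.pyRange 0 largura 1,
        pvContrib matriz largura altura x y p) p _
      (fun s y => pv_mem_foldl _ p _ (fun s x => pv_mem_step matriz largura altura x y s p)
        (PySem.List.pyRange 0 largura 1) s)]
  simp [PySem.Set.empty]

-- for an in-grid non-empty cell, membership in the border set IS A's borda test
lemma pv_border_eq_borda (matriz : List (List Int)) (largura altura x y : Int)
    (hx0 : 0 ≤ x) (hx1 : x < largura) (hy0 : 0 ≤ y) (hy1 : y < altura)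
    (hnz : pvCell matriz y x ≠ 0) :
    PySem.Set.contains (pvBorderSet matriz largura altura) (x, y) =
      borda matriz largura altura x y := by
  cases hcb : PySem.Set.contains (pvBorderSet matriz largura altura) (x, y) with
  | true =>
      -- member ⇒ borda is true
      have hmem : (x, y) ∈ pvBorderSet matriz largura altura :=
        List.mem_of_elem_eq_true hcb
      rw [pv_mem_borderSet] at hmem
      obtain ⟨b, hbmem, a, hamem, hc⟩ := hmem
      symm
      rw [pv_borda_iff]
      refine ⟨hnz, ?_⟩
      unfold pvContrib at hc
      split_ifs at hc with h0
      · obtain ⟨hp, -⟩ := hc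
        rcases hp with hp | hp | hp | hp <;> rw [Prod.ext_iff] at hp <;>
          simp only [] at hp <;> obtain ⟨hpa, hpb⟩ := hp
        · -- (x, y) = (a - 1, b): right neighbor of p is the empty cell
          refine Or.inr (Or.inr (Or.inr (Or.inr (Or.inr (Or.inl ?_)))))
          have e1 : x + 1 = a := by omega
          rw [hpb, e1]; exact h0
        · -- (x, y) = (a + 1, b): left neighbor
          refine Or.inr (Or.inr (Or.inr (Or.inr (Or.inl ?_))))
          have e1 : x - 1 = a := by omega
          rw [hpb, e1]; exact h0
        · -- (x, y) = (a, b - 1): neighbor below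
          refine Or.inr (Or.inr (Or.inr (Or.inr (Or.inr (Or.inr (Or.inr ?_))))))
          have e1 : y + 1 = b := by omega
          rw [e1, hpa]; exact h0
        · -- (x, y) = (a, b + 1): neighbor above
          refine Or.inr (Or.inr (Or.inr (Or.inr (Or.inr (Or.inr (Or.inl ?_))))))
          have e1 : y - 1 = b := by omega
          rw [e1, hpa]; exact h0
      · obtain ⟨hedge, hp⟩ := hc
        rw [Prod.ext_iff] at hp
        simp only [] at hp
        obtain ⟨hpa, hpb⟩ := hp
        subst hpa; subst hpb
        rcases hedge with h | h | h | h
        · exact Or.inl h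
        · exact Or.inr (Or.inl h)
        · exact Or.inr (Or.inr (Or.inl h))
        · exact Or.inr (Or.inr (Or.inr (Or.inl h)))
  | false =>
      -- not a member ⇒ borda is false
      symm
      rw [Bool.eq_false_iff]
      intro hT
      rw [pv_borda_iff] at hT
      obtain ⟨-, hdisj⟩ := hT
      have hmem : (x, y) ∈ pvBorderSet matriz largura altura := by
        rw [pv_mem_borderSet]
        by_cases hedge : x = 0 ∨ y = 0 ∨ x = largura - 1 ∨ y = altura - 1
        · refine ⟨y, ?_, x, ?_, ?_⟩
          · rw [PySem.List.mem_pyRange_one]; omega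
          · rw [PySem.List.mem_pyRange_one]; omega
          · unfold pvContrib; rw [if_neg hnz]; exact ⟨hedge, rfl⟩
        · rw [not_or, not_or, not_or] at hedge
          obtain ⟨he1, he2, he3, he4⟩ := hedge
          rcases hdisj with h | h | h | h | h | h | h | h
          · exact absurd h he1
          · exact absurd h he2
          · exact absurd h he3
          · exact absurd h he4
          · -- empty cell to the left, at (x - 1, y)
            refine ⟨y, ?_, x - 1, ?_, ?_⟩
            · rw [PySem.List.mem_pyRange_one]; omega
            · rw [PySem.List.mem_pyRange_one]; omega
            · unfold pvContrib; rw [if_pos h]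
              refine ⟨Or.inr (Or.inl ?_), hx0, hx1, hy0, hy1, hnz⟩
              rw [Prod.ext_iff]; constructor
              · simp only []; omega
              · rfl
          · -- empty cell to the right, at (x + 1, y)
            refine ⟨y, ?_, x + 1, ?_, ?_⟩
            · rw [PySem.List.mem_pyRange_one]; omega
            · rw [PySem.List.mem_pyRange_one]; omega
            · unfold pvContrib; rw [if_pos h]
              refine ⟨Or.inl ?_, hx0, hx1, hy0, hy1, hnz⟩
              rw [Prod.ext_iff]; constructor
              · simp only []; omega
              · rfl
          · -- empty cell above, at (x, y - 1)
            refine ⟨y - 1, ?_, x, ?_, ?_⟩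
            · rw [PySem.List.mem_pyRange_one]; omega
            · rw [PySem.List.mem_pyRange_one]; omega
            · unfold pvContrib; rw [if_pos h]
              refine ⟨Or.inr (Or.inr (Or.inr ?_)), hx0, hx1, hy0, hy1, hnz⟩
              rw [Prod.ext_iff]; constructor
              · rfl
              · simp only []; omega
          · -- empty cell below, at (x, y + 1)
            refine ⟨y + 1, ?_, x, ?_, ?_⟩
            · rw [PySem.List.mem_pyRange_one]; omega
            · rw [PySem.List.mem_pyRange_one]; omega
            · unfold pvContrib; rw [if_pos h]
              refine ⟨Or.inr (Or.inr (Or.inl ?_)), hx0, hx1, hy0, hy1, hnz⟩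
              rw [Prod.ext_iff]; constructor
              · rfl
              · simp only []; omega
      have htrue : PySem.Set.contains (pvBorderSet matriz largura altura) (x, y) = true :=
        List.elem_eq_true_of_mem hmem
      rw [hcb] at htrue
      exact absurd htrue Bool.false_ne_true

-- ===== VERDICT (by name: the statement is the Claim_ definition above) =====
theorem quantidade_blocos_spec : Claim_equal_quantidade_blocos := by
  intro matriz largura altura _ _
  unfold Spec_quantidade_blocos quantidade_blocos quantidade_blocos_alt
  apply PySem.List.foldl_congr_mem
  intro soma y hy
  apply PySem.List.foldl_congr_mem
  intro soma' x hx
  rw [PySem.List.mem_pyRange_one] at hy hx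
  by_cases hnz : pvCell matriz y x ≠ 0
  · rw [if_pos hnz, if_pos hnz,
        pv_border_eq_borda matriz largura altura x y hx.1 hx.2 hy.1 hy.2 hnz]
    cases borda matriz largura altura x y <;> simp
  · rw [if_neg hnz, if_neg hnz]
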